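-- pv_equiv track=rewrite | github.com/xia2/xia2 | src/xia2/Experts/Filenames.py | windows_environment_vars_to_unix
-- ===== SOURCE A (Python) =====
-- def windows_environment_vars_to_unix(token):
--     """Transmogrify windows environment tokens (e.g. %WINDIR%) to
--     the UNIX form ($WINDIR) for python environment token replacement."""
--
--     if token.count("%") % 2:
--         raise RuntimeError("must have even number of % tokens")
--
--     in_env_variable = False
--
--     token_list = token.split("%")
--     result = ""
--     for l in token_list:
--         if not in_env_variable:
--             result += l
--             in_env_variable = True
--         else:
--             result += "$%s" % l
--             in_env_variable = False
--
--     return result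
-- ===== SOURCE B (Python) =====
-- def windows_environment_vars_to_unix(token):
--     """Transmogrify windows environment tokens (e.g. %WINDIR%) to
--     the UNIX form ($WINDIR) for python environment token replacement."""
--
--     if token.count("%") % 2:
--         raise RuntimeError("must have even number of % tokens")
--
--     out = []
--     chars = iter(token)
--     for ch in chars:
--         if ch == "%":
--             out.append("$")
--             for ch2 in chars:
--                 if ch2 == "%":
--                     break
--                 out.append(ch2)
--         else:
--             out.append(ch)
--     return "".join(out)
-- ===== Notes on version B (the rewrite author's own statement) =====
-- stated objective: simpler
-- what changed: Replaced A's split-on-'%' plus boolean-toggle fold over the segments by a single-pass character scanner that copies characters and, on '%', emits '$' and copies the variable name up to the closing '%'; the odd-count guard is kept.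
import Mathlib
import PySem

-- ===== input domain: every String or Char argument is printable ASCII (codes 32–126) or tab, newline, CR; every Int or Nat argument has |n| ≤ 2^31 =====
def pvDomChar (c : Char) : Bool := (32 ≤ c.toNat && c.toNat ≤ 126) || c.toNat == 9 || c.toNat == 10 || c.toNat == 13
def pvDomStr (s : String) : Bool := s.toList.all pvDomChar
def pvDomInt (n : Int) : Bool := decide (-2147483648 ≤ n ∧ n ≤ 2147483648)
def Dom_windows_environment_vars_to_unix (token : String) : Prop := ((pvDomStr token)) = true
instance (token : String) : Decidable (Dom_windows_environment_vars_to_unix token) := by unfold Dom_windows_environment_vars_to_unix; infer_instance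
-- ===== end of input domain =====

-- B replaces A's split-on-'%'-and-toggle loop by a single character scanner (copy chars;
-- on '%' emit '$' and copy the variable name up to the closing '%'): simpler/idiomatic, same cost.

-- ===== PORT A =====
-- one fold step of A's 'for l in token_list' loop; state = (result, in_env_variable)
def pvAStep (st : List Char × Bool) (l : List Char) : List Char × Bool :=
  if st.2 = false then (st.1 ++ l, true) else (st.1 ++ '$' :: l, false)

-- the 'raise RuntimeError' branch (odd number of '%') is excluded by Pre_ below
def windows_environment_vars_to_unix (token : String) : String :=
  String.ofList (((PySem.Chars.splitOn token.toList ['%']).foldl pvAStep ([], false)).1)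

-- ===== PORT B =====
-- B's scanner: pvScanB = the outer for-loop, pvSkipB = the inner loop copying a variable name
mutual
def pvScanB : List Char → List Char
  | [] => []
  | c :: rest => if c = '%' then '$' :: pvSkipB rest else c :: pvScanB rest
def pvSkipB : List Char → List Char
  | [] => []
  | c :: rest => if c = '%' then pvScanB rest else c :: pvSkipB rest
end

-- B's guard (odd number of '%' raises) is the same as A's, excluded by Pre_ below
def windows_environment_vars_to_unix_alt (token : String) : String :=
  String.ofList (pvScanB token.toList)

-- ===== PRECONDITION & SPEC =====
-- both programs raise RuntimeError when token has an odd number of '%'; excluded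
def Pre_windows_environment_vars_to_unix (token : String) : Prop :=
  (PySem.Str.count token "%") % 2 = 0
instance (token : String) : Decidable (Pre_windows_environment_vars_to_unix token) := by
  unfold Pre_windows_environment_vars_to_unix; infer_instance
def pvWitness_windows_environment_vars_to_unix : String := "path\\%WINDIR%\\x"

def Spec_windows_environment_vars_to_unix (token : String) (out : String) : Prop := out = windows_environment_vars_to_unix_alt token
instance (token : String) (out : String) : Decidable (Spec_windows_environment_vars_to_unix token out) := by unfold Spec_windows_environment_vars_to_unix; infer_instance

-- ===== CLAIM (what is proved, stated in full; the proofs are below) =====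
def Claim_equal_windows_environment_vars_to_unix : Prop := ∀ (token : String), Dom_windows_environment_vars_to_unix token → Pre_windows_environment_vars_to_unix token → Spec_windows_environment_vars_to_unix token (windows_environment_vars_to_unix token)

-- ===== LEMMAS AND PROOFS =====

-- splitOn.go's accumulator is a reversed prefix of the output
lemma pv_go_acc (fuel : Nat) (l cur : List Char) (acc : List (List Char)) :
    PySem.Chars.splitOn.go ['%'] fuel l cur acc
      = acc.reverse ++ PySem.Chars.splitOn.go ['%'] fuel l cur [] := by
  induction fuel generalizing l cur acc with
  | zero => simp [PySem.Chars.splitOn.go]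
  | succ n ih =>
    cases l with
    | nil => simp [PySem.Chars.splitOn.go]
    | cons c rest =>
      by_cases h : c = '%'
      · subst h
        simp only [PySem.Chars.splitOn.go, List.isPrefixOf, beq_self_eq_true, Bool.true_and,
          if_true, List.length_cons, List.length_nil, List.drop_succ_cons,
          List.drop_zero]
        rw [ih rest [] (cur.reverse :: acc), ih rest [] [cur.reverse]]
        simp
      · simp only [PySem.Chars.splitOn.go, List.isPrefixOf]
        rw [if_neg (by simp; exact fun e => h e.symm), if_neg (by simp; exact fun e => h e.symm)]
        exact ih rest (c :: cur) acc

-- A's fold over the '%'-split segments equals B's scanner, for any partial segment / flag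
lemma pv_main (fuel : Nat) : ∀ (l cur res : List Char) (b : Bool), l.length < fuel →
    ((PySem.Chars.splitOn.go ['%'] fuel l cur []).foldl pvAStep (res, b)).1
      = res ++ (if b then '$' :: cur.reverse ++ pvSkipB l else cur.reverse ++ pvScanB l) := by
  induction fuel with
  | zero => intro l cur res b h; omega
  | succ n ih =>
    intro l cur res b h
    cases l with
    | nil =>
      cases b <;> simp [PySem.Chars.splitOn.go, pvAStep, pvScanB, pvSkipB]
    | cons c rest =>
      by_cases hc : c = '%'
      · subst hc
        simp only [PySem.Chars.splitOn.go, List.isPrefixOf, beq_self_eq_true, Bool.true_and,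
          if_true, List.length_cons, List.length_nil, List.drop_succ_cons,
          List.drop_zero]
        rw [pv_go_acc n rest [] [cur.reverse]]
        simp only [List.reverse_cons, List.reverse_nil, List.nil_append, List.singleton_append,
          List.foldl_cons]
        cases b with
        | false =>
          rw [show pvAStep (res, false) cur.reverse = (res ++ cur.reverse, true) from rfl]
          rw [ih rest [] (res ++ cur.reverse) true (by simpa using Nat.lt_of_succ_lt_succ h)]
          simp [pvScanB]
        | true =>
          rw [show pvAStep (res, true) cur.reverse = (res ++ '$' :: cur.reverse, false) from rfl]
          rw [ih rest [] (res ++ '$' :: cur.reverse) false (by simpa using Nat.lt_of_succ_lt_succ h)]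
          simp [pvSkipB]
      · simp only [PySem.Chars.splitOn.go, List.isPrefixOf]
        rw [if_neg (by simp; exact fun e => hc e.symm)]
        rw [ih rest (c :: cur) res b (by simpa using Nat.lt_of_succ_lt_succ h)]
        cases b <;> simp [pvScanB, pvSkipB, hc]

-- ===== VERDICT (by name: the statement is the Claim_ definition above) =====
theorem windows_environment_vars_to_unix_spec : Claim_equal_windows_environment_vars_to_unix := by
  intro token _ _
  unfold Spec_windows_environment_vars_to_unix
  unfold windows_environment_vars_to_unix windows_environment_vars_to_unix_alt
  rw [show PySem.Chars.splitOn token.toList ['%']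
        = PySem.Chars.splitOn.go ['%'] (token.toList.length + 1) token.toList [] [] from rfl]
  rw [pv_main (token.toList.length + 1) token.toList [] [] false (Nat.lt_succ_self _)]
  simp
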